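-- pv_equiv track=rewrite | github.com/Charle-Mary/Data_Structures_and_Algorithms | ppduplicate.py | recurkillprocess
-- ===== SOURCE A (Python) =====
-- from collections import defaultdict, Counter, deque
--
-- def recurkillprocess(pid,ppid,kill):
--     d = defaultdict(list)
--
--     for i,pp in enumerate(ppid):
--         d[pp].append(pid[i])
--     res = []
--     def dfs(node,visited = {}):
--         visited[node] = True
--
--         res.append(node)
--         for nx in d[node]:
--             if nx in visited:
--                 continue
--             dfs(nx,visited)
--
--     dfs(kill)
--     return res
-- ===== SOURCE B (Python) =====
-- def recurkillprocess(pid, ppid, kill):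
--     children = {}
--     for child, parent in zip(pid, ppid):
--         children.setdefault(parent, []).append(child)
--     res = []
--     visited = set()
--     stack = [kill]
--     while stack:
--         node = stack.pop()
--         if node in visited:
--             continue
--         visited.add(node)
--         res.append(node)
--         for nx in reversed(children.get(node, [])):
--             if nx not in visited:
--                 stack.append(nx)
--     return res
-- ===== Notes on version B (the rewrite author's own statement) =====
-- stated objective: alternative
-- what changed: Replaces the recursive dfs with shared mutable visited/res state by an iterative explicit-stack loop (pop a node, skip if visited, append, push unvisited children in reversed order), preserving the exact pre-order.
import Mathlib
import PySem

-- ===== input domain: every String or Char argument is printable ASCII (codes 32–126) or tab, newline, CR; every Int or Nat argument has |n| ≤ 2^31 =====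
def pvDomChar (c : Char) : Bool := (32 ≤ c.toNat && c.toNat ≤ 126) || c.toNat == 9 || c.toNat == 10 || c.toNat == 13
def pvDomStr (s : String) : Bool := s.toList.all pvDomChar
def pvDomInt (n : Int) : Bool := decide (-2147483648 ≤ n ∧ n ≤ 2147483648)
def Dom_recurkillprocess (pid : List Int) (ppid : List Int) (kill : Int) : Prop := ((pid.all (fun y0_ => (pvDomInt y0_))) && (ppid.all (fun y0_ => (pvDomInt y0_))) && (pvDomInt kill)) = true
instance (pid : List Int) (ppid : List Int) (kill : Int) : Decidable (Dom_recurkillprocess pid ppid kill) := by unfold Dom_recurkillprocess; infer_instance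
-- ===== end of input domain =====

-- B replaces A's recursive dfs (shared mutable visited/res) by an iterative explicit-stack loop
-- with the same pre-order output (objective: alternative).


-- ===== PORT A =====
-- d = defaultdict(list); for i, pp in enumerate(ppid): d[pp].append(pid[i])
-- pyGetD's default 0 is only reached where Python raises IndexError (excluded by Pre_).
def pvBuildA (pid ppid : List Int) : PySem.Dict Int (List Int) :=
  (PySem.List.enumerate ppid).foldl
    (fun d ip => d.modify ip.2 [] (· ++ [PySem.List.pyGetD pid ip.1 0]))
    PySem.Dict.empty

-- the recursive dfs; fuel bounds the recursion DEPTH (≤ number of distinct nodes ≤ pid.length + 1,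
-- proved in the lemmas below — fuel 0 is never reached under Pre_).
mutual
def pvDfsA (d : PySem.Dict Int (List Int)) :
    Nat → PySem.Dict Int Bool × List Int → Int → PySem.Dict Int Bool × List Int
  | 0, st, _ => st
  | f+1, (v, r), node =>
      -- visited[node] = True ; res.append(node) ; for nx in d[node]: …
      pvDfsListA d f (v.insert node true, r ++ [node]) (d.getD node [])
  termination_by f _ _ => (f, 0, 0)
def pvDfsListA (d : PySem.Dict Int (List Int)) :
    Nat → PySem.Dict Int Bool × List Int → List Int → PySem.Dict Int Bool × List Int
  | _, st, [] => st
  | f, (v, r), c :: cs =>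
      if ((v.get? c).isSome) then pvDfsListA d f (v, r) cs
      else pvDfsListA d f (pvDfsA d f (v, r) c) cs
  termination_by f _ cs => (f, 1, cs.length)
end

def recurkillprocess (pid : List Int) (ppid : List Int) (kill : Int) : List Int :=
  let d := pvBuildA pid ppid
  (pvDfsA d (pid.length + 1) (PySem.Dict.empty, []) kill).2

-- ===== PORT B =====
-- children = {}; for child, parent in zip(pid, ppid): children.setdefault(parent, []).append(child)
def pvBuildB (pid ppid : List Int) : PySem.Dict Int (List Int) :=
  (pid.zip ppid).foldl
    (fun m cp => m.modify cp.2 [] (· ++ [cp.1]))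
    PySem.Dict.empty

-- the while-stack loop; fuel bounds the number of iterations (≤ 1 + total pushes,
-- proved sufficient in the lemmas below — fuel 0 is never reached with the fuel chosen).
def pvLoopB (ch : PySem.Dict Int (List Int)) :
    Nat → List Int → PySem.Set Int → List Int → List Int
  | _, [], _, r => r
  | 0, _ :: _, _, r => r
  | f+1, node :: s, v, r =>
      if PySem.Set.contains v node then pvLoopB ch f s v r
      else
        let v' := PySem.Set.add v node
        let r' := r ++ [node]
        let s' := (ch.getD node []).reverse.foldl
          (fun acc c => if PySem.Set.contains v' c then acc else c :: acc) s
        pvLoopB ch f s' v' r'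

def recurkillprocess_alt (pid : List Int) (ppid : List Int) (kill : Int) : List Int :=
  let ch := pvBuildB pid ppid
  pvLoopB ch ((pid.length + 1) * (ppid.length + 1) + 1) [kill] PySem.Set.empty []

-- ===== PRECONDITION & SPEC =====
-- Pre_ excludes exactly the inputs where A raises IndexError (ppid longer than pid: pid[i] out of range).
def Pre_recurkillprocess (pid : List Int) (ppid : List Int) (kill : Int) : Prop :=
  ppid.length ≤ pid.length
instance (pid : List Int) (ppid : List Int) (kill : Int) : Decidable (Pre_recurkillprocess pid ppid kill) := by unfold Pre_recurkillprocess; infer_instance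

def pvWitness_recurkillprocess : List Int × List Int × Int := ([3, 4], [1, 1], 1)

def Spec_recurkillprocess (pid : List Int) (ppid : List Int) (kill : Int) (out : List Int) : Prop := out = recurkillprocess_alt pid ppid kill
instance (pid : List Int) (ppid : List Int) (kill : Int) (out : List Int) : Decidable (Spec_recurkillprocess pid ppid kill out) := by unfold Spec_recurkillprocess; infer_instance

-- ===== CLAIM (what is proved, stated in full; the proofs are below) =====
def Claim_equal_recurkillprocess : Prop := ∀ (pid : List Int) (ppid : List Int) (kill : Int), Dom_recurkillprocess pid ppid kill → Pre_recurkillprocess pid ppid kill → Spec_recurkillprocess pid ppid kill (recurkillprocess pid ppid kill)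


-- ===== LEMMAS AND PROOFS =====

theorem pvRevFoldl (v' : List Int) (l acc : List Int) :
    l.reverse.foldl (fun acc c => if PySem.Set.contains v' c then acc else c :: acc) acc
      = l.filter (fun c => !PySem.Set.contains v' c) ++ acc := by
  induction l generalizing acc with
  | nil => simp
  | cons c l ih =>
      simp only [List.reverse_cons, List.foldl_append, List.foldl_cons, List.foldl_nil, ih,
        List.filter_cons]
      split_ifs <;> simp_all
inductive ExecL (d : PySem.Dict Int (List Int)) :
    List Int → List Int → List Int → List Int → List Int → Prop
  | nil : ∀ v r, ExecL d [] v r v r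
  | skip : ∀ c cs v r v' r', c ∈ v → ExecL d cs v r v' r' → ExecL d (c :: cs) v r v' r'
  | visit : ∀ c cs v r v₁ r₁ v' r', c ∉ v →
      ExecL d (d.getD c []) (v ++ [c]) (r ++ [c]) v₁ r₁ →
      ExecL d cs v₁ r₁ v' r' →
      ExecL d (c :: cs) v r v' r'
def pvPushB (d : PySem.Dict Int (List Int)) (v' : List Int) (node : Int) (s : List Int) : List Int :=
  (d.getD node []).reverse.foldl
    (fun acc c => if PySem.Set.contains v' c then acc else c :: acc) s
theorem pvPushB_eq_filter' (d : PySem.Dict Int (List Int)) (v' : List Int) (node : Int) (s : List Int) :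
    pvPushB d v' node s = (d.getD node []).filter (fun c => !PySem.Set.contains v' c) ++ s :=
  pvRevFoldl v' _ s
inductive LoopR (d : PySem.Dict Int (List Int)) :
    List Int → List Int → List Int → List Int → Prop
  | nil : ∀ v r, LoopR d [] v r r
  | skip : ∀ n s v r out, n ∈ v → LoopR d s v r out → LoopR d (n :: s) v r out
  | visit : ∀ n s v r out, n ∉ v →
      LoopR d (pvPushB d (v ++ [n]) n s) (v ++ [n]) (r ++ [n]) out →
      LoopR d (n :: s) v r out
theorem execL_grow {d : PySem.Dict Int (List Int)} {cs v r v' r' : List Int}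
    (h : ExecL d cs v r v' r') : ∃ t, v' = v ++ t ∧ r' = r ++ t := by
  induction h with
  | nil => exact ⟨[], by simp⟩
  | skip c cs v r v' r' hc hrec ih => exact ih
  | visit c cs v r v₁ r₁ v' r' hc h1 h2 ih1 ih2 =>
      obtain ⟨t1, hv1, hr1⟩ := ih1
      obtain ⟨t2, hv2, hr2⟩ := ih2
      exact ⟨[c] ++ t1 ++ t2, by simp [hv2, hv1, hr2, hr1]⟩
theorem loopR_det {d : PySem.Dict Int (List Int)} {s v r out : List Int}
    (h : LoopR d s v r out) : ∀ {out'}, LoopR d s v r out' → out = out' := by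
  induction h with
  | nil v r => intro out' h'; cases h' with | nil => rfl
  | skip n s v r out hn hrec ih =>
      intro out' h'
      cases h' with
      | skip _ _ _ _ _ _ h2 => exact ih h2
      | visit _ _ _ _ _ hn' _ => exact absurd hn hn'
  | visit n s v r out hn hrec ih =>
      intro out' h'
      cases h' with
      | skip _ _ _ _ _ hn' _ => exact absurd hn' hn
      | visit _ _ _ _ _ _ h2 => exact ih h2
theorem execL_to_loopR {d : PySem.Dict Int (List Int)} {cs v r v' r' : List Int}
    (h : ExecL d cs v r v' r') :
    ∀ (vF s out : List Int), (∀ x, x ∈ vF → x ∈ v) → LoopR d s v' r' out →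
      LoopR d (cs.filter (fun c => !PySem.Set.contains vF c) ++ s) v r out := by
  induction h with
  | nil v r => intro vF s out hsub hl; simpa using hl
  | skip c cs v r v' r' hc hrec ih =>
      intro vF s out hsub hl
      rw [List.filter_cons]
      by_cases hm : c ∈ vF
      · rw [if_neg (by simp [hm])]
        exact ih vF s out hsub hl
      · rw [if_pos (by simp [hm]), List.cons_append]
        exact LoopR.skip c _ v r out hc (ih vF s out hsub hl)
  | visit c cs v r v₁ r₁ v' r' hc h1 h2 ih1 ih2 =>
      intro vF s out hsub hl
      have hcF : c ∉ vF := fun hx => hc (hsub c hx)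
      rw [List.filter_cons, if_pos (by simp [hcF]), List.cons_append]
      refine LoopR.visit c _ v r out hc ?_
      rw [pvPushB_eq_filter']
      refine ih1 (v ++ [c]) _ out (fun x hx => hx) ?_
      have hsub1 : ∀ x, x ∈ vF → x ∈ v₁ := by
        obtain ⟨t, hv, _⟩ := execL_grow h1
        intro x hx
        simp [hv, hsub x hx]
      exact ih2 vF s out hsub1 hl
theorem pvDfsListA_exec (d : PySem.Dict Int (List Int)) (Uni : Finset Int)
    (hcl : ∀ k : Int, ∀ x ∈ d.getD k [], x ∈ Uni) :
    ∀ (f : Nat) (cs : List Int) (v : PySem.Dict Int Bool) (r : List Int),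
      (∀ x ∈ cs, x ∈ Uni) →
      (Uni \ v.keys.toFinset).card ≤ f →
      ExecL d cs v.keys r (pvDfsListA d f (v, r) cs).1.keys (pvDfsListA d f (v, r) cs).2 := by
  intro f
  induction f using Nat.strong_induction_on with
  | _ f IHf =>
    intro cs
    induction cs with
    | nil =>
        intro v r _ _
        rw [pvDfsListA]
        exact ExecL.nil _ _
    | cons c cs ihcs =>
        intro v r hmem hcard
        rw [pvDfsListA]
        by_cases hg : (v.get? c).isSome
        · rw [if_pos hg]
          have hcm : c ∈ v.keys := by
            by_contra hnc
            rw [← PySem.Dict.get?_eq_none_iff_not_mem_keys] at hnc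
            simp [hnc] at hg
          exact ExecL.skip _ _ _ _ _ _ hcm
            (ihcs v r (fun x hx => hmem x (by simp [hx])) hcard)
        · rw [if_neg hg]
          have hcm : c ∉ v.keys := by
            intro hmemk
            have := (PySem.Dict.get?_eq_none_iff_not_mem_keys (d := v) (k := c))
            rcases ho : v.get? c with _ | w
            · exact (this.mp ho) hmemk
            · exact hg (by simp [ho])
          have hcu : c ∈ Uni := hmem c (by simp)
          have hcsd : c ∈ Uni \ v.keys.toFinset := by
            simp [Finset.mem_sdiff, hcu, hcm]
          have hpos : 1 ≤ (Uni \ v.keys.toFinset).card := Finset.card_pos.mpr ⟨c, hcsd⟩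
          cases f with
          | zero => omega
          | succ g =>
            rw [pvDfsA]
            have hnc : v.contains c = false := by
              rw [PySem.Dict.contains_eq_isSome_get?]
              simpa using hg
            have hkeys : (v.insert c true).keys = v.keys ++ [c] :=
              PySem.Dict.keys_insert_of_not_contains v true hnc
            have hcard1 : (Uni \ (v.insert c true).keys.toFinset).card ≤ g := by
              rw [hkeys]
              have : (v.keys ++ [c]).toFinset = insert c v.keys.toFinset := by
                simp [List.toFinset_append]
              rw [this, Finset.sdiff_insert]
              have := Finset.card_erase_of_mem hcsd
              omega
            have E1 := IHf g (by omega) (d.getD c []) (v.insert c true) (r ++ [c])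
              (fun x hx => hcl c x hx) hcard1
            set st := pvDfsListA d g (v.insert c true, r ++ [c]) (d.getD c []) with hst
            have E2 : ExecL d cs st.1.keys st.2
                (pvDfsListA d (g+1) st cs).1.keys (pvDfsListA d (g+1) st cs).2 := by
              have hsub : (Uni \ st.1.keys.toFinset).card ≤ g + 1 := by
                obtain ⟨t, hv, _⟩ := execL_grow E1
                have : (Uni \ st.1.keys.toFinset) ⊆ (Uni \ (v.insert c true).keys.toFinset) := by
                  apply Finset.sdiff_subset_sdiff (Finset.Subset.refl _)
                  intro x hx
                  rw [hv]
                  simp at hx ⊢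
                  exact Or.inl hx
                have := Finset.card_le_card this
                omega
              have := ihcs st.1 st.2 (fun x hx => hmem x (by simp [hx])) hsub
              simpa using this
            rw [hkeys] at E1
            exact ExecL.visit c cs v.keys r st.1.keys st.2 _ _ hcm E1 E2
theorem pvLoopB_loopR (d : PySem.Dict Int (List Int)) (Uni : Finset Int)
    (hcl : ∀ k : Int, ∀ x ∈ d.getD k [], x ∈ Uni) :
    ∀ (f : Nat) (s : List Int) (v : PySem.Set Int) (r : List Int),
      (∀ x ∈ s, x ∈ Uni) →
      s.length + ((Uni \ v.toFinset).sum fun k => (d.getD k []).length) ≤ f →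
      LoopR d s v r (pvLoopB d f s v r) := by
  intro f
  induction f with
  | zero =>
      intro s v r _ hf
      have : s = [] := by
        cases s with
        | nil => rfl
        | cons a t => simp at hf
      subst this
      rw [pvLoopB]
      exact LoopR.nil _ _
  | succ f ih =>
      intro s v r hmem hf
      cases s with
      | nil => rw [pvLoopB]; exact LoopR.nil _ _
      | cons n s =>
        rw [pvLoopB]
        by_cases hn : PySem.Set.contains v n
        · rw [if_pos hn]
          have hnv : n ∈ v := (PySem.Set.contains_iff _ _).mp hn
          refine LoopR.skip n s v r _ hnv (ih s v r (fun x hx => hmem x (by simp [hx])) ?_)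
          simp at hf
          omega
        · rw [if_neg hn]
          simp only []
          have hnv : n ∉ v := fun hx => hn ((PySem.Set.contains_iff _ _).mpr hx)
          have hadd : PySem.Set.add v n = v ++ [n] := PySem.Set.add_of_not_mem hnv
          rw [hadd]
          refine LoopR.visit n s v r _ hnv ?_
          show LoopR d (pvPushB d (v ++ [n]) n s) (v ++ [n]) (r ++ [n]) _
          have hnu : n ∈ Uni := hmem n (by simp)
          have hnsd : n ∈ Uni \ v.toFinset := by simp [Finset.mem_sdiff, hnu, hnv]
          have hins : (v ++ [n]).toFinset = insert n v.toFinset := by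
            simp [List.toFinset_append]
          refine ih _ _ _ ?_ ?_
          · intro x hx
            rw [pvPushB_eq_filter'] at hx
            rcases List.mem_append.mp hx with hx | hx
            · exact hcl n x (List.mem_of_mem_filter hx)
            · exact hmem x (by simp [hx])
          · have hlen : (pvPushB d (v ++ [n]) n s).length ≤ (d.getD n []).length + s.length := by
              rw [pvPushB_eq_filter']
              have := List.length_filter_le (fun c => !PySem.Set.contains (v ++ [n]) c) (d.getD n [])
              simp only [List.length_append]
              omega
            have hsum : ((Uni \ v.toFinset).erase n).sum (fun k => (d.getD k []).length)
                + (d.getD n []).length = (Uni \ v.toFinset).sum (fun k => (d.getD k []).length) :=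
              Finset.sum_erase_add _ _ hnsd
            rw [hins, Finset.sdiff_insert]
            simp at hf
            omega
theorem enum_map_zip (ppid : List Int) :
    ∀ (pid : List Int) (k : Nat), k + ppid.length ≤ pid.length →
      (PySem.List.enumerate ppid (k : Int)).map (fun ip => (PySem.List.pyGetD pid ip.1 0, ip.2))
        = (pid.drop k).zip ppid := by
  induction ppid with
  | nil => intro pid k _; simp [PySem.List.enumerate_nil]
  | cons pp rest ih =>
      intro pid k hk
      simp only [List.length_cons] at hk
      rw [PySem.List.enumerate_cons, List.map_cons]
      have hklt : k < pid.length := by omega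
      have h1 : PySem.List.pyGetD pid (k : Int) 0 = pid[k] := by
        rw [PySem.List.pyGetD_natCast]
        exact List.getD_eq_getElem pid 0 hklt
      have h2 : ((k : Int) + 1) = ((k + 1 : Nat) : Int) := by push_cast; ring
      rw [h1, h2, ih pid (k+1) (by omega)]
      rw [List.drop_eq_getElem_cons hklt]
      rfl
theorem build_eq (pid ppid : List Int) (h : ppid.length ≤ pid.length) :
    pvBuildA pid ppid = pvBuildB pid ppid := by
  unfold pvBuildA pvBuildB
  have hz : (PySem.List.enumerate ppid).map (fun ip => (PySem.List.pyGetD pid ip.1 0, ip.2))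
      = pid.zip ppid := by
    have := enum_map_zip ppid pid 0 (by omega)
    simpa using this
  rw [← hz, List.foldl_map]
theorem getD_build (pid ppid : List Int) (k : Int) :
    (pvBuildB pid ppid).getD k [] = ((pid.zip ppid).filter (fun cp => cp.2 == k)).map (·.1) := by
  have hb : pvBuildB pid ppid
      = ((pid.zip ppid).map (fun cp => (cp.2, cp.1))).foldl
          (fun d p => d.modify p.1 [] (· ++ [p.2])) PySem.Dict.empty := by
    unfold pvBuildB
    rw [List.foldl_map]
  rw [hb, PySem.Dict.getD_foldl_modify_append]
  simp [List.filter_map, List.map_map, Function.comp_def]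
theorem mem_getD_build {pid ppid : List Int} {k x : Int}
    (h : x ∈ (pvBuildB pid ppid).getD k []) : x ∈ pid := by
  rw [getD_build] at h
  obtain ⟨cp, hcp, rfl⟩ := List.mem_map.mp h
  exact (List.of_mem_zip (List.mem_of_mem_filter hcp)).1
theorem length_getD_build (pid ppid : List Int) (k : Int) :
    ((pvBuildB pid ppid).getD k []).length ≤ ppid.length := by
  rw [getD_build]
  calc (((pid.zip ppid).filter (fun cp => cp.2 == k)).map (·.1)).length
      ≤ (pid.zip ppid).length := by
        rw [List.length_map]; exact List.length_filter_le _ _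
    _ ≤ ppid.length := by rw [List.length_zip]; omega
theorem final (pid ppid : List Int) (kill : Int) (hpre : ppid.length ≤ pid.length) :
    recurkillprocess pid ppid kill = recurkillprocess_alt pid ppid kill := by
  have hd : pvBuildA pid ppid = pvBuildB pid ppid := build_eq pid ppid hpre
  set d := pvBuildB pid ppid with hdd
  set Uni : Finset Int := insert kill pid.toFinset with hU
  have hcl : ∀ k : Int, ∀ x ∈ d.getD k [], x ∈ Uni := by
    intro k x hx
    exact Finset.mem_insert_of_mem (List.mem_toFinset.mpr (mem_getD_build hx))
  have hcardU : Uni.card ≤ pid.length + 1 := by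
    calc Uni.card ≤ pid.toFinset.card + 1 := Finset.card_insert_le _ _
      _ ≤ pid.length + 1 := by have := pid.toFinset_card_le; omega
  -- A side
  have hguard : (((PySem.Dict.empty : PySem.Dict Int Bool).get? kill).isSome) = false := by
    simp [PySem.Dict.get?_empty]
  have hlist : pvDfsListA d (pid.length+1) (PySem.Dict.empty, []) [kill]
      = pvDfsA d (pid.length+1) (PySem.Dict.empty, []) kill := by
    rw [pvDfsListA, if_neg (by simp), pvDfsListA]
  have hexec := pvDfsListA_exec d Uni hcl (pid.length+1) [kill] PySem.Dict.empty []
      (by intro x hx; simp at hx; subst hx; simp [hU])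
      (by simp [PySem.Dict.keys_empty]; omega)
  rw [hlist] at hexec
  set XA := pvDfsA d (pid.length+1) (PySem.Dict.empty, []) kill with hXA
  simp only [PySem.Dict.keys_empty] at hexec
  have hAres : recurkillprocess pid ppid kill = XA.2 := by
    unfold recurkillprocess
    rw [hd]
  -- bridge: LoopR d [kill] [] [] XA.2
  have hbridge : LoopR d [kill] [] [] XA.2 := by
    have h0 := execL_to_loopR hexec [] [] XA.2 (by intro x hx; simp at hx)
      (LoopR.nil _ _)
    simpa using h0
  -- B side
  have hB : LoopR d [kill] [] []
      (pvLoopB d ((pid.length + 1) * (ppid.length + 1) + 1) [kill] PySem.Set.empty []) := by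
    have hsum : ((Uni \ (PySem.Set.empty : PySem.Set Int).toFinset).sum
        fun k => (d.getD k []).length) ≤ (pid.length + 1) * ppid.length := by
      have h1 : ((Uni \ (PySem.Set.empty : PySem.Set Int).toFinset).sum
          fun k => (d.getD k []).length) ≤ (Uni \ (PySem.Set.empty : PySem.Set Int).toFinset).card * ppid.length := by
        apply Finset.sum_le_card_nsmul
        intro x _
        exact length_getD_build pid ppid x
      have h2 : (Uni \ (PySem.Set.empty : PySem.Set Int).toFinset).card ≤ pid.length + 1 := by
        have := Finset.card_le_card (Finset.sdiff_subset (s := Uni) (t := (PySem.Set.empty : PySem.Set Int).toFinset))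
        omega
      calc _ ≤ _ := h1
        _ ≤ (pid.length + 1) * ppid.length := Nat.mul_le_mul_right _ h2
    apply pvLoopB_loopR d Uni hcl
    · intro x hx; simp at hx; subst hx; simp [hU]
    · have : (pid.length + 1) * (ppid.length + 1) + 1
          = (pid.length + 1) * ppid.length + (pid.length + 1) + 1 := by ring
      simp only [List.length_cons, List.length_nil]
      simp only [PySem.Set.empty] at hsum
      omega
  have := loopR_det hbridge hB
  rw [hAres, this]
  rfl

-- ===== VERDICT (by name: the statement is the Claim_ definition above) =====
theorem recurkillprocess_spec : Claim_equal_recurkillprocess := by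
  intro pid ppid kill _ hpre
  unfold Spec_recurkillprocess
  exact final pid ppid kill hpre
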